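-- pv_equiv track=rewrite | github.com/gogotape/yandex_algorithms_5.0 | lesson1/task_E.py | calc_profit
-- ===== SOURCE A (Python) =====
-- def calc_profit(n, k, days):
--     profit = n
--     for _ in range(days):
--         profit = profit * 10
--         for digit in range(0, 10):
--             if (profit + digit) % k == 0:
--                 profit += digit
--                 if digit == 0:
--                     res = str(profit)
--                     for day in range(_ + 1, days):
--                         res += str(0)
--                     try:
--                         return int(res)
--                     except ValueError:
--                         return res
--                 break
--
--         else:
--             return -1
--
--     return profit
-- ===== SOURCE B (Python) =====
-- def calc_profit(n, k, days):
--     if days <= 0: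
--         return n
--     d = (-(n * 10)) % abs(k)
--     if d > 9:
--         return -1
--     return (n * 10 + d) * 10 ** (days - 1)
-- ===== Notes on version B (the rewrite author's own statement) =====
-- stated objective: simpler
-- what changed: Replaces the day-by-day loop (each day scanning ten digits and, on digit 0, building the result by string concatenation) with a closed form: only the first day's digit can be nonzero, so B computes it as (-(n*10)) % abs(k) and appends the remaining days-1 zeros as one power of 10.
import Mathlib
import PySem

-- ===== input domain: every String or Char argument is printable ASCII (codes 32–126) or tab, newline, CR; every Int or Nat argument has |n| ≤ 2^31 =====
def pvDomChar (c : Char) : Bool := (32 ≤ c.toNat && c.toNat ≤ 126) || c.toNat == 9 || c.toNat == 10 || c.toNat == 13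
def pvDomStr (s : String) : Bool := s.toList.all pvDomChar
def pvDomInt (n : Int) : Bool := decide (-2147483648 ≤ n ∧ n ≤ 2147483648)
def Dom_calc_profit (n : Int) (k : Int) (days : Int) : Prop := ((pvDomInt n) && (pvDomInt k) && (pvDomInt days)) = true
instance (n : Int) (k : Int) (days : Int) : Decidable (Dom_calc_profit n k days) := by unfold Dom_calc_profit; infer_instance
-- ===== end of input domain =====

-- B replaces A's day-by-day digit search with a closed form: only the first appended digit
-- can be nonzero (afterwards the number is divisible by k), so one modular step plus one power.

-- ===== PORT A =====
-- outer loop 'for _ in range(days)': recursion counting the remaining iterations, carrying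
-- the current index i and 'profit'; the inner 'for digit in range(0, 10): … break /
-- else: return -1' is List.find? over the same range.
def calcProfitLoop (k : Int) (days : Int) : Int → Int → Nat → Int
  | profit, _, 0 => profit
  | profit, i, fuel + 1 =>
    let p := profit * 10
    match (PySem.List.pyRange 0 10 1).find? (fun d => PySem.Int.mod? (p + d) k == some 0) with
    | none => -1                       -- inner loop's 'else: return -1'
    | some digit =>
      let p := p + digit
      if digit == 0 then
        -- Python: res = str(profit); for day in range(_+1, days): res += str(0); return int(res).
        -- Same loop, ported arithmetically: each appended '0' multiplies the value by 10 and
        -- int(str(x)) = x, so int(res) is exactly this fold (the except-ValueError branch is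
        -- unreachable: res is always a valid integer literal).
        (PySem.List.pyRange (i + 1) days 1).foldl (fun r _ => r * 10) p
      else
        calcProfitLoop k days p (i + 1) fuel   -- 'break', next outer iteration

def calc_profit (n : Int) (k : Int) (days : Int) : Int :=
  calcProfitLoop k days n 0 days.toNat

-- ===== PORT B =====
def calc_profit_alt (n : Int) (k : Int) (days : Int) : Int :=
  if days ≤ 0 then n
  else
    let d := PySem.Int.mod (-(n * 10)) |k|
    if d > 9 then -1
    else (n * 10 + d) * 10 ^ (days - 1).toNat

-- ===== PRECONDITION & SPEC =====
-- Pre_ excludes exactly k = 0 with days ≥ 1: there '(profit + digit) % k' raises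
-- ZeroDivisionError in A (and B's '% abs(k)' raises it too).
def Pre_calc_profit (n : Int) (k : Int) (days : Int) : Prop := days ≤ 0 ∨ k ≠ 0
instance (n : Int) (k : Int) (days : Int) : Decidable (Pre_calc_profit n k days) := by unfold Pre_calc_profit; infer_instance
def pvWitness_calc_profit : Int × Int × Int := (17, 3, 4)
def Spec_calc_profit (n : Int) (k : Int) (days : Int) (out : Int) : Prop := out = calc_profit_alt n k days
instance (n : Int) (k : Int) (days : Int) (out : Int) : Decidable (Spec_calc_profit n k days out) := by unfold Spec_calc_profit; infer_instance

-- ===== CLAIM (what is proved, stated in full; the proofs are below) =====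
def Claim_equal_calc_profit : Prop := ∀ (n : Int) (k : Int) (days : Int), Dom_calc_profit n k days → Pre_calc_profit n k days → Spec_calc_profit n k days (calc_profit n k days)

-- ===== LEMMAS AND PROOFS =====

-- |k| divides p + (-p).emod |k|
lemma dvd_add_emod (k p : Int) : |k| ∣ (p + (-p).emod |k|) := by
  refine ⟨-((-p) / |k|), ?_⟩
  have h := Int.emod_def (-p) |k|
  rw [show (-p).emod |k| = -p - |k| * (-p / |k|) from h]
  ring

-- the inner digit scan, started at j ≤ m (m := smallest nonnegative residue of -p mod |k|):
-- it finds m if m ≤ 9, else nothing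
lemma find_digit_from (k p : Int) (hk : k ≠ 0) :
    ∀ (j : Int), 0 ≤ j → j ≤ (-p).emod |k| →
    (PySem.List.pyRange j 10 1).find? (fun d => PySem.Int.mod? (p + d) k == some 0)
      = if (-p).emod |k| ≤ 9 then some ((-p).emod |k|) else none := by
  have hK : (0:Int) < |k| := abs_pos.mpr hk
  set m := (-p).emod |k| with hm
  have hdvd : ∀ d : Int, ((PySem.Int.mod? (p + d) k == some 0) = true) ↔ |k| ∣ (p + d) := by
    intro d
    rw [beq_iff_eq, PySem.Int.mod?_eq_some_zero_iff_dvd hk, abs_dvd]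
  have key : ∀ fuel : Nat, ∀ j : Int, (10 - j).toNat ≤ fuel → 0 ≤ j → j ≤ m →
      (PySem.List.pyRange j 10 1).find? (fun d => PySem.Int.mod? (p + d) k == some 0)
        = if m ≤ 9 then some m else none := by
    intro fuel
    induction fuel with
    | zero =>
      intro j hfj h0 hjm
      have h10 : (10:Int) ≤ j := by omega
      rw [PySem.List.pyRange_one_eq_nil h10]
      simp only [List.find?_nil]
      rw [if_neg (by omega)]
    | succ f ih =>
      intro j hfj h0 hjm
      by_cases h10 : (10:Int) ≤ j
      · rw [PySem.List.pyRange_one_eq_nil h10]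
        simp only [List.find?_nil]
        rw [if_neg (by omega)]
      · rw [PySem.List.pyRange_one_cons (by omega)]
        by_cases hje : j = m
        · have hc : (PySem.Int.mod? (p + j) k == some 0) = true := by
            rw [hdvd j, hje]
            exact dvd_add_emod k p
          rw [List.find?_cons_of_pos (p := fun d => PySem.Int.mod? (p + d) k == some 0) hc, hje, if_pos (by omega)]
        · have hlt : j < m := lt_of_le_of_ne hjm hje
          have hcf : (PySem.Int.mod? (p + j) k == some 0) = false := by
            rw [Bool.eq_false_iff]
            intro hc
            have hd : |k| ∣ (p + j) := (hdvd j).mp hc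
            have hd2 : |k| ∣ (j - m) := by
              have := dvd_sub hd (dvd_add_emod k p)
              simpa using this
            have hmlt : m < |k| := Int.emod_lt_of_pos _ hK
            have hz : j - m = 0 :=
              Int.eq_zero_of_abs_lt_dvd hd2 (by rw [abs_sub_comm, abs_of_nonneg (by omega)]; omega)
            omega
          rw [List.find?_cons_of_neg (p := fun d => PySem.Int.mod? (p + d) k == some 0) (by simp [hcf])]
          exact ih (j + 1) (by omega) (by omega) (by omega)
  intro j h0 hjm
  exact key (10 - j).toNat j le_rfl h0 hjm

-- the zero-padding loop: multiplying by 10 once per element of range(a, b)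
lemma foldl_mul10 (x a b : Int) :
    (PySem.List.pyRange a b 1).foldl (fun r _ => r * 10) x = x * 10 ^ (b - a).toNat := by
  have key : ∀ fuel : Nat, ∀ a x : Int, (b - a).toNat ≤ fuel →
      (PySem.List.pyRange a b 1).foldl (fun r _ => r * 10) x = x * 10 ^ (b - a).toNat := by
    intro fuel
    induction fuel with
    | zero =>
      intro a x hf
      have hba : b ≤ a := by omega
      rw [PySem.List.pyRange_one_eq_nil hba]
      simp [Int.toNat_of_nonpos (by omega : b - a ≤ 0)]
    | succ f ih =>
      intro a x hf
      by_cases hba : b ≤ a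
      · rw [PySem.List.pyRange_one_eq_nil hba]
        simp [Int.toNat_of_nonpos (by omega : b - a ≤ 0)]
      · rw [PySem.List.pyRange_one_cons (by omega)]
        rw [List.foldl_cons, ih (a + 1) (x * 10) (by omega)]
        have h1 : (b - a).toNat = (b - (a + 1)).toNat + 1 := by omega
        rw [h1, pow_succ]
        ring
  exact key (b - a).toNat a x le_rfl

-- ===== VERDICT (by name: the statement is the Claim_ definition above) =====
theorem calc_profit_spec : Claim_equal_calc_profit := by
  intro n k days _ hpre
  unfold Spec_calc_profit calc_profit calc_profit_alt
  by_cases hd : days ≤ 0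
  · rw [show days.toNat = 0 from by omega, if_pos hd]
    rfl
  · have hk : k ≠ 0 := by
      rcases hpre with h | h
      · omega
      · exact h
    have hK : (0:Int) < |k| := abs_pos.mpr hk
    rw [if_neg hd]
    obtain ⟨m, hm⟩ : ∃ m, (-(n * 10)).emod |k| = m := ⟨_, rfl⟩
    have hm0 : 0 ≤ m := hm ▸ Int.emod_nonneg _ (by omega)
    have hmod : PySem.Int.mod (-(n * 10)) |k| = m := hm ▸ PySem.Int.mod_eq_emod_of_pos hK
    obtain ⟨f, hf⟩ : ∃ f, days.toNat = f + 1 := ⟨(days - 1).toNat, by omega⟩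
    rw [hf, calcProfitLoop]
    rw [find_digit_from k (n * 10) hk 0 le_rfl (by omega), hm]
    by_cases hm9 : m ≤ 9
    · rw [if_pos hm9, hmod, if_neg (by omega)]
      dsimp only
      by_cases hmz : m = 0
      · -- first digit is already 0: zero-pad to the end
        rw [if_pos (by simp [hmz])]
        rw [foldl_mul10]
        subst hmz
        norm_num
      · -- a nonzero first digit; afterwards the number is divisible by k
        rw [if_neg (by simp [hmz])]
        have hdvd1 : |k| ∣ (n * 10 + m) := hm ▸ dvd_add_emod k (n * 10)
        by_cases hd1 : days ≤ 1
        · rw [show f = 0 from by omega, calcProfitLoop]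
          have : (days - 1).toNat = 0 := by omega
          rw [this]
          ring
        · obtain ⟨g, hg⟩ : ∃ g, f = g + 1 := ⟨f - 1, by omega⟩
          rw [hg, calcProfitLoop]
          have hdvd2 : |k| ∣ ((n * 10 + m) * 10) := Dvd.dvd.mul_right hdvd1 10
          have hm2 : (-((n * 10 + m) * 10)).emod |k| = 0 :=
            Int.emod_eq_zero_of_dvd ((dvd_neg).mpr hdvd2)
          rw [find_digit_from k ((n * 10 + m) * 10) hk 0 le_rfl (by rw [hm2])]
          rw [hm2, if_pos (by omega)]
          dsimp only
          rw [if_pos (by simp)]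
          rw [foldl_mul10]
          have h1 : (days - (0 + 1 + 1)).toNat + 1 = (days - 1).toNat := by omega
          rw [← h1, pow_succ]
          ring
    · rw [if_neg hm9, hmod, if_pos (by omega)]
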